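-- pv_equiv track=rewrite | github.com/cedricgeissmann/kombinatorik-mit-python | helpers.py | _count_levels
-- ===== SOURCE A (Python) =====
-- def _count_levels(Z):
--     counter = {}
--     for tup in Z:
--         for i in range(len(tup)):
--             try:
--                 counter[i].add(tup[i:i+1])
--             except(KeyError):
--                 counter[i] = set()
--                 counter[i].add(tup[i:i+1])
--     return counter
-- ===== SOURCE B (Python) =====
-- def _count_levels(Z):
--     maxlen = 0
--     for tup in Z:
--         if len(tup) > maxlen:
--             maxlen = len(tup)
--     counter = {}
--     for i in range(maxlen):
--         s = set()
--         for tup in Z: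
--             if i < len(tup):
--                 s.add(tup[i:i+1])
--         counter[i] = s
--     return counter
-- ===== Notes on version B (the rewrite author's own statement) =====
-- stated objective: alternative
-- what changed: Replaces A's row-major pass with try/except dict building by a column-major traversal: compute the maximum tuple length first, then for each column index build its set in one inner scan over Z and assign it once.
import Mathlib
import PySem

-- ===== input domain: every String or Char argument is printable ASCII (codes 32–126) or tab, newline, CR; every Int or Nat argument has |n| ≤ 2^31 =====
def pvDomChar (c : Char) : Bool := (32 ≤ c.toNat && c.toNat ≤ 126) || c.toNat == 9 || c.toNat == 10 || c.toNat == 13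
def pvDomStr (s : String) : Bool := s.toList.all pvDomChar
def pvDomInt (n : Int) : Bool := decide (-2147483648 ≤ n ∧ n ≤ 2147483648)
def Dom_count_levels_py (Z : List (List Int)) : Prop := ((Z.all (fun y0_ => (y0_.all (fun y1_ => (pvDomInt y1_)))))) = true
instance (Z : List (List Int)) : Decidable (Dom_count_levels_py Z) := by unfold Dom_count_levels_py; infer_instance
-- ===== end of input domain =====

-- B replaces A's row-major pass (try/except per cell) by a column-major traversal (max length
-- first, then one fresh set per column); alternative decomposition, no speed claim.

-- ===== PORT A =====
-- row-major: for each tuple, for each index, add the 1-slice to counter[i], creating the set on KeyError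
def count_levels_py (Z : List (List Int)) : List (Int × List (List Int)) :=
  (Z.foldl (fun counter tup =>
      (PySem.List.pyRange 0 (tup.length : Int) 1).foldl (fun counter i =>
        match counter.get? i with
        | some s =>
            counter.insert i (PySem.Set.add s (PySem.List.slice tup (some i) (some (i+1))))
        | none =>
            -- counter[i] = set(); counter[i].add(tup[i:i+1])
            (counter.insert i PySem.Set.empty).insert i
              (PySem.Set.add PySem.Set.empty (PySem.List.slice tup (some i) (some (i+1))))
      ) counter
    ) PySem.Dict.empty).items

-- ===== PORT B =====
-- column-major: maximum tuple length first, then one inner scan of Z per column index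
def count_levels_py_alt (Z : List (List Int)) : List (Int × List (List Int)) :=
  let maxlen : Int := Z.foldl (fun m tup => if (tup.length : Int) > m then (tup.length : Int) else m) 0
  ((PySem.List.pyRange 0 maxlen 1).foldl (fun counter i =>
      counter.insert i (Z.foldl (fun s tup =>
          if i < (tup.length : Int) then
            PySem.Set.add s (PySem.List.slice tup (some i) (some (i+1)))
          else s)
        PySem.Set.empty)
    ) PySem.Dict.empty).items

-- ===== PRECONDITION & SPEC =====
def Spec_count_levels_py (Z : List (List Int)) (out : List (Int × List (List Int))) : Prop := out = count_levels_py_alt Z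
instance (Z : List (List Int)) (out : List (Int × List (List Int))) : Decidable (Spec_count_levels_py Z out) := by unfold Spec_count_levels_py; infer_instance

-- ===== CLAIM (what is proved, stated in full; the proofs are below) =====
def Claim_equal_count_levels_py : Prop := ∀ (Z : List (List Int)), Dom_count_levels_py Z → Spec_count_levels_py Z (count_levels_py Z)

-- ===== LEMMAS AND PROOFS =====

-- the set collected at column i over the rows Z (B's inner loop; also the value A ends up holding at key i)
def pvCol (Z : List (List Int)) (i : Int) : List (List Int) :=
  Z.foldl (fun s tup =>
      if i < (tup.length : Int) then
        PySem.Set.add s (PySem.List.slice tup (some i) (some (i+1)))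
      else s)
    PySem.Set.empty

def pvMlen (Z : List (List Int)) : Nat := Z.foldl (fun m t => max m t.length) 0

def pvInner (tup : List Int) (d : PySem.Dict Int (List (List Int))) : PySem.Dict Int (List (List Int)) :=
  (PySem.List.pyRange 0 (tup.length : Int) 1).foldl (fun counter i =>
    match counter.get? i with
    | some s =>
        counter.insert i (PySem.Set.add s (PySem.List.slice tup (some i) (some (i+1))))
    | none =>
        (counter.insert i PySem.Set.empty).insert i
          (PySem.Set.add PySem.Set.empty (PySem.List.slice tup (some i) (some (i+1))))
    ) d

def pvH (tup : List Int) (M L : Nat) (g : Int → List (List Int)) (j : Nat) : List (List Int) :=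
  if j < L then
    PySem.Set.add (if j < M then g (j : Int) else PySem.Set.empty)
      (PySem.List.slice tup (some (j : Int)) (some ((j : Int)+1)))
  else g (j : Int)

theorem pv_count_eq (Z : List (List Int)) :
    count_levels_py Z = (Z.foldl (fun d tup => pvInner tup d) PySem.Dict.empty).items := rfl

def pvMk (M : Nat) (g : Int → List (List Int)) : PySem.Dict Int (List (List Int)) :=
  PySem.Dict.mk ((List.range M).map (fun j => (Int.ofNat j, g (Int.ofNat j))))

theorem pv_keys_mk (M : Nat) (g : Int → List (List Int)) :
    (pvMk M g).keys = (List.range M).map (fun j => Int.ofNat j) := by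
  simp only [pvMk, PySem.Dict.keys, List.map_map]
  rfl

theorem pv_nodup_keys (M : Nat) (g : Int → List (List Int)) : (pvMk M g).keys.Nodup := by
  rw [pv_keys_mk]
  exact List.nodup_range.map (fun a b h => Int.ofNat_inj.mp h)

theorem pv_get?_lt (M : Nat) (g : Int → List (List Int)) {L : Nat} (h : L < M) :
    (pvMk M g).get? (Int.ofNat L) = some (g (Int.ofNat L)) := by
  apply PySem.Dict.get?_of_mem_items _ _ (pv_nodup_keys M g)
  exact List.mem_map.mpr ⟨L, List.mem_range.mpr h, rfl⟩

theorem pv_get?_ge (M : Nat) (g : Int → List (List Int)) {L : Nat} (h : M ≤ L) :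
    (pvMk M g).get? (Int.ofNat L) = none := by
  rw [PySem.Dict.get?_eq_none_iff_not_mem_keys, pv_keys_mk]
  intro hmem
  rcases List.mem_map.mp hmem with ⟨j, hj, hje⟩
  have hjm := List.mem_range.mp hj
  have : j = L := Int.ofNat_inj.mp hje
  omega

theorem pv_contains_mk (M : Nat) (g : Int → List (List Int)) (L : Nat) :
    (pvMk M g).contains (Int.ofNat L) = decide (L < M) := by
  rw [PySem.Dict.contains_eq_decide_mem_keys, pv_keys_mk]
  by_cases h : L < M
  · simp only [h, decide_true, decide_eq_true_eq]
    exact List.mem_map.mpr ⟨L, List.mem_range.mpr h, rfl⟩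
  · simp only [h, decide_false, decide_eq_false_iff_not]
    intro hmem
    rcases List.mem_map.mp hmem with ⟨j, hj, hje⟩
    have hjm := List.mem_range.mp hj
    have : j = L := Int.ofNat_inj.mp hje
    omega

theorem pvMk_congr (M : Nat) (g1 g2 : Int → List (List Int))
    (h : ∀ j < M, g1 (Int.ofNat j) = g2 (Int.ofNat j)) : pvMk M g1 = pvMk M g2 := by
  unfold pvMk
  exact congrArg PySem.Dict.mk (List.map_congr_left (fun j hj => by
    rw [h j (List.mem_range.mp hj)]))

theorem pv_insert_lt (N : Nat) (g' : Int → List (List Int)) (L : Nat) (h : L < N)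
    (v : List (List Int)) :
    (pvMk N g').insert (Int.ofNat L) v
      = pvMk N (fun i => if i = Int.ofNat L then v else g' i) := by
  have hc : (pvMk N g').contains (Int.ofNat L) = true := by
    rw [pv_contains_mk]; simp [h]
  apply PySem.Dict.ext
  rw [PySem.Dict.items_insert_of_contains _ _ hc]
  show _ = (pvMk N _).items
  simp only [pvMk, List.map_map]
  apply List.map_congr_left
  intro j hj
  by_cases hje : j = L
  · subst hje; simp
  · have : (Int.ofNat j == Int.ofNat L) = false := by
      simp only [beq_eq_false_iff_ne, ne_eq]
      exact fun hh => hje (Int.ofNat_inj.mp hh)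
    have hne : ¬ (Int.ofNat j = Int.ofNat L) := fun hh => hje (Int.ofNat_inj.mp hh)
    simp only [Function.comp_apply, this, Bool.false_eq_true, if_false, if_neg hne]

theorem pv_insert_ge (N : Nat) (g' : Int → List (List Int)) (v : List (List Int)) :
    (pvMk N g').insert (Int.ofNat N) v
      = pvMk (N+1) (fun i => if i = Int.ofNat N then v else g' i) := by
  have hc : (pvMk N g').contains (Int.ofNat N) = false := by
    rw [pv_contains_mk]; simp
  apply PySem.Dict.ext
  rw [PySem.Dict.items_insert_of_not_contains _ _ hc]
  show _ = (pvMk (N+1) _).items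
  simp only [pvMk, List.range_succ, List.map_append, List.map_cons, List.map_nil]
  congr 1
  · apply List.map_congr_left
    intro j hj
    have hjN := List.mem_range.mp hj
    have : ¬ (Int.ofNat j = Int.ofNat N) := fun hh => by
      have := Int.ofNat_inj.mp hh; omega
    rw [if_neg this]

theorem pv_innerA (tup : List Int) (M : Nat) (g : Int → List (List Int)) (L : Nat) :
    (PySem.List.pyRange 0 (Int.ofNat L) 1).foldl (fun counter i =>
      match counter.get? i with
      | some s =>
          counter.insert i (PySem.Set.add s (PySem.List.slice tup (some i) (some (i+1))))
      | none =>
          (counter.insert i PySem.Set.empty).insert i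
            (PySem.Set.add PySem.Set.empty (PySem.List.slice tup (some i) (some (i+1))))
      ) (pvMk M g)
    = pvMk (max M L) (fun i => pvH tup M L g i.toNat) := by
  induction L with
  | zero =>
      rw [PySem.List.pyRange_one_eq_nil (by simp)]
      simp only [List.foldl_nil, Nat.max_zero]
      apply pvMk_congr
      intro j hj
      simp [pvH]
  | succ L ih =>
      have hcast : (Int.ofNat (L+1)) = (Int.ofNat L) + 1 := by simp
      rw [hcast, PySem.List.pyRange_one_succ_right (by simp [Int.ofNat_eq_natCast]), List.foldl_append,
        List.foldl_cons, List.foldl_nil, ih]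
      by_cases hLM : L < M
      · have hmax : max M L = M := by omega
        have hmax2 : max M (L+1) = M := by omega
        rw [hmax, hmax2]
        rw [pv_get?_lt M _ hLM]
        show (pvMk M _).insert (Int.ofNat L) _ = _
        rw [pv_insert_lt M _ L hLM]
        apply pvMk_congr
        intro j hj
        by_cases hje : j = L
        · subst hje
          simp [pvH, hLM]
        · have : ¬ (Int.ofNat j = Int.ofNat L) := fun hh => hje (Int.ofNat_inj.mp hh)
          simp only [this, if_false]
          by_cases hj2 : j < L
          · simp [pvH, hj2, show j < L + 1 by omega]
          · simp [pvH, hj2, show ¬ (j < L + 1) by omega]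
      · have hmax : max M L = L := by omega
        have hmax2 : max M (L+1) = L + 1 := by omega
        rw [hmax, hmax2]
        rw [pv_get?_ge L _ (le_refl L)]
        show ((pvMk L _).insert (Int.ofNat L) _).insert (Int.ofNat L) _ = _
        rw [PySem.Dict.insert_insert_self, pv_insert_ge L _ _]
        apply pvMk_congr
        intro j hj
        by_cases hje : j = L
        · subst hje
          simp [pvH, hLM]
        · have : ¬ (Int.ofNat j = Int.ofNat L) := fun hh => hje (Int.ofNat_inj.mp hh)
          simp only [this, if_false]
          have hj2 : j < L := by omega
          simp [pvH, hj2, show j < L + 1 by omega]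

theorem pvMlen_append (P : List (List Int)) (t : List Int) :
    pvMlen (P ++ [t]) = max (pvMlen P) t.length := by
  simp [pvMlen, List.foldl_append]

theorem pvCol_append (P : List (List Int)) (t : List Int) (i : Int) :
    pvCol (P ++ [t]) i =
      if i < (t.length : Int) then
        PySem.Set.add (pvCol P i) (PySem.List.slice t (some i) (some (i+1)))
      else pvCol P i := by
  simp [pvCol, List.foldl_append]

theorem pvCol_empty (P : List (List Int)) (i : Int) (h : (pvMlen P : Int) ≤ i) :
    pvCol P i = PySem.Set.empty := by
  induction P using List.reverseRecOn with
  | nil => rfl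
  | append_singleton P t ih =>
      rw [pvMlen_append] at h
      push_cast at h
      rw [pvCol_append, if_neg (by omega)]
      exact ih (by omega)

theorem pv_outer (Z : List (List Int)) :
    Z.foldl (fun d tup => pvInner tup d) PySem.Dict.empty
      = pvMk (pvMlen Z) (fun i => pvCol Z i) := by
  induction Z using List.reverseRecOn with
  | nil => rfl
  | append_singleton P t ih =>
      rw [List.foldl_append, List.foldl_cons, List.foldl_nil, ih]
      show (PySem.List.pyRange 0 (t.length : Int) 1).foldl _ _ = _
      have hb : (t.length : Int) = Int.ofNat t.length := rfl
      rw [hb, pv_innerA t (pvMlen P) (fun i => pvCol P i) t.length, pvMlen_append]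
      apply pvMk_congr
      intro j hj
      have ht : (Int.ofNat j).toNat = j := rfl
      rw [ht, pvCol_append]
      simp only [pvH, Int.ofNat_eq_natCast]
      by_cases h1 : j < t.length
      · rw [if_pos h1, if_pos (show (j : Int) < (t.length : Int) by exact_mod_cast h1)]
        by_cases h2 : j < pvMlen P
        · rw [if_pos h2]
        · rw [if_neg h2, pvCol_empty P _ (by exact_mod_cast Nat.le_of_not_lt h2)]
      · rw [if_neg h1, if_neg (show ¬ (j : Int) < (t.length : Int) by exact_mod_cast h1)]

theorem pv_A_items (Z : List (List Int)) :
    count_levels_py Z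
      = (List.range (pvMlen Z)).map (fun (j : Nat) => ((j : Int), pvCol Z (j : Int))) := by
  rw [pv_count_eq, pv_outer]
  show (List.range (pvMlen Z)).map _ = _
  apply List.map_congr_left
  intro j hj
  simp [Int.ofNat_eq_natCast]

theorem pv_maxI (Z : List (List Int)) (acc : Nat) :
    Z.foldl (fun m tup => if (tup.length : Int) > m then (tup.length : Int) else m) (acc : Int)
      = ((Z.foldl (fun m t => max m t.length) acc : Nat) : Int) := by
  induction Z generalizing acc with
  | nil => rfl
  | cons t Z ih =>
      simp only [List.foldl_cons]
      have h : (if (t.length : Int) > (acc : Int) then (t.length : Int) else (acc : Int))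
          = ((max acc t.length : Nat) : Int) := by
        split_ifs with hh <;> push_cast <;> omega
      rw [h, ih]

theorem pv_B_items (Z : List (List Int)) :
    count_levels_py_alt Z
      = (List.range (pvMlen Z)).map (fun (j : Nat) => ((j : Int), pvCol Z (j : Int))) := by
  show ((PySem.List.pyRange 0
      (Z.foldl (fun m tup => if (tup.length : Int) > m then (tup.length : Int) else m) 0) 1).foldl _
      PySem.Dict.empty).items = _
  have hm : Z.foldl (fun m tup => if (tup.length : Int) > m then (tup.length : Int) else m) 0
      = ((pvMlen Z : Nat) : Int) := by
    have := pv_maxI Z 0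
    simpa using this
  rw [hm, PySem.List.pyRange_one]
  have hl : ((((pvMlen Z : Nat) : Int) - 0).toNat) = pvMlen Z := by simp
  rw [hl]
  rw [show (fun (counter : PySem.Dict Int (List (List Int))) (i : Int) =>
        counter.insert i (Z.foldl (fun s tup =>
            if i < (tup.length : Int) then
              PySem.Set.add s (PySem.List.slice tup (some i) (some (i+1)))
            else s)
          PySem.Set.empty))
      = (fun (counter : PySem.Dict Int (List (List Int))) (i : Int) =>
          counter.insert ((fun (a : Int) => a) i) (pvCol Z i)) from rfl]
  rw [PySem.Dict.items_foldl_insert_fresh _ (fun a => a) (fun i => pvCol Z i) PySem.Dict.empty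
    (fun a _ => PySem.Dict.contains_empty a)
    (by
      simp only [List.map_id']
      exact (List.nodup_range.map (fun a b hh => by
        have : (0 : Int) + a = 0 + b := hh
        omega)))]
  simp only [List.map_map]
  show _ = (List.range (pvMlen Z)).map _
  apply List.map_congr_left
  intro j hj
  simp [pvCol]

-- ===== VERDICT (by name: the statement is the Claim_ definition above) =====
theorem count_levels_py_spec : Claim_equal_count_levels_py := by
  intro Z _
  show count_levels_py Z = count_levels_py_alt Z
  rw [pv_A_items, pv_B_items]
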